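-- pv_equiv track=rewrite | github.com/myhyper/acm | python/1904/first.py | foo
-- ===== SOURCE A (Python) =====
-- M=15746
--
-- def sigma(n):
--   rtv = 0
--   for i in range(n):
--     rtv += i
--   return rtv
--
-- def foo(n):
--   if n <= 1: return 0
--   if n == 2: return 2
--   if n == 3: return 3
--   a = sigma(n-3)
--   b = 0
--   for i in range(n-3):
--     b *= 2
--     b %= M
--     if 0 == b: b = 1
--   # return (n + a + int(math.pow(2,n-4) % M)) % M
--   return (n + a + int(b % M)) % M
--   return b
-- ===== SOURCE B (Python) =====
-- M = 15746
--
-- def foo(n):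
--     if n <= 1: return 0
--     if n == 2: return 2
--     if n == 3: return 3
--     return (n + (n - 3) * (n - 4) // 2 + pow(2, n - 4, M)) % M
-- ===== Notes on version B (the rewrite author's own statement) =====
-- stated objective: faster
-- what changed: Replaces the O(n) summation loop by the closed-form triangular number (n-3)(n-4)//2 and the O(n) doubling loop by three-argument pow(2, n-4, M) (fast modular exponentiation).
import Mathlib
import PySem

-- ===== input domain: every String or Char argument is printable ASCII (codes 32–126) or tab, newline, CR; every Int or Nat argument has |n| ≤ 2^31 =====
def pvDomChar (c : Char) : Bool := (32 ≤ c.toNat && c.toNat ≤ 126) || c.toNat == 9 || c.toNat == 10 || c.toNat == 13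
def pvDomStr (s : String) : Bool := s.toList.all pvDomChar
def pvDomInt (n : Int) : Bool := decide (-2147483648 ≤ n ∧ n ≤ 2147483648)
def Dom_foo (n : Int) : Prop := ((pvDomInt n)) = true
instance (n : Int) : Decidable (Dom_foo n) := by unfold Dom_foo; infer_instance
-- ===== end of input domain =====

-- B replaces A's two O(n) loops by a closed-form triangular sum and fast modular
-- exponentiation pow(2, n-4, M): asymptotically faster (O(log n) vs O(n)).

-- ===== PORT A =====
-- sigma(n): sum of range(n) by a loop
def sigmaA (n : Int) : Int :=
  (PySem.List.pyRange 0 n 1).foldl (fun rtv i => rtv + i) 0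

def foo (n : Int) : Int :=
  if n ≤ 1 then 0
  else if n = 2 then 2
  else if n = 3 then 3
  else
    let a := sigmaA (n - 3)
    let b := (PySem.List.pyRange 0 (n - 3) 1).foldl
      (fun b _ =>
        let b := PySem.Int.mod (b * 2) 15746
        if 0 = b then 1 else b) 0
    PySem.Int.mod (n + a + PySem.Int.mod b 15746) 15746

-- ===== PORT B =====
def foo_alt (n : Int) : Int :=
  if n ≤ 1 then 0
  else if n = 2 then 2
  else if n = 3 then 3
  else PySem.Int.mod
    (n + PySem.Int.floordiv ((n - 3) * (n - 4)) 2 + PySem.Int.powMod 2 (n - 4).toNat 15746)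
    15746

-- ===== PRECONDITION & SPEC =====
def Spec_foo (n : Int) (out : Int) : Prop := out = foo_alt n
instance (n : Int) (out : Int) : Decidable (Spec_foo n out) := by unfold Spec_foo; infer_instance

-- ===== CLAIM (what is proved, stated in full; the proofs are below) =====
def Claim_equal_foo : Prop := ∀ (n : Int), Dom_foo n → Spec_foo n (foo n)

-- ===== LEMMAS AND PROOFS =====

-- A's sigma loop computes the triangular number: 2 * sigma(m) = m * (m - 1).
theorem sigmaA_eq (m : Nat) : 2 * sigmaA (m : Int) = (m : Int) * ((m : Int) - 1) := by
  induction m with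
  | zero => simp [sigmaA, PySem.List.pyRange_one_eq_nil]
  | succ m ih =>
    have h : PySem.List.pyRange 0 ((m : Int) + 1) 1
        = PySem.List.pyRange 0 (m : Int) 1 ++ [(m : Int)] := by
      exact PySem.List.pyRange_one_succ_right (by positivity)
    unfold sigmaA at ih ⊢
    push_cast
    rw [h, List.foldl_append]
    simp only [List.foldl]
    linear_combination ih

-- 15746 never divides a power of two (15746 = 2 * 7873, odd cofactor).
theorem pow_two_mod_ne_zero (k : Nat) : (2 : Int) ^ k % 15746 ≠ 0 := by
  intro h
  have hdvd : (15746 : Int) ∣ (2 : Int) ^ k := Int.dvd_of_emod_eq_zero h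
  have hdvdN : (15746 : Nat) ∣ 2 ^ k := by
    have : ((15746 : Nat) : Int) ∣ ((2 ^ k : Nat) : Int) := by push_cast; exact hdvd
    exact_mod_cast this
  have h7873 : (7873 : Nat) ∣ 2 ^ k := dvd_trans ⟨2, by norm_num⟩ hdvdN
  have hcop : Nat.Coprime 7873 (2 ^ k) := (by decide : Nat.Coprime 7873 2).pow_right k
  have : (7873 : Nat) = 1 := by
    rw [← Nat.gcd_eq_left h7873]; exact hcop
  exact absurd this (by norm_num)

-- A's doubling loop computes 2^m mod 15746 after m+1 iterations.
theorem loopB_eq (m : Nat) :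
    (PySem.List.pyRange 0 ((m : Int) + 1) 1).foldl
      (fun b _ =>
        let b := PySem.Int.mod (b * 2) 15746
        if 0 = b then 1 else b) 0 = (2 : Int) ^ m % 15746 := by
  induction m with
  | zero =>
    decide
  | succ m ih =>
    have h : PySem.List.pyRange 0 ((m : Int) + 1 + 1) 1
        = PySem.List.pyRange 0 ((m : Int) + 1) 1 ++ [(m : Int) + 1] := by
      exact PySem.List.pyRange_one_succ_right (by positivity)
    push_cast
    rw [h, List.foldl_append, ih]
    simp only [List.foldl]
    have hmod : PySem.Int.mod ((2 : Int) ^ m % 15746 * 2) 15746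
        = (2 : Int) ^ (m + 1) % 15746 := by
      rw [PySem.Int.mod_eq_emod_of_pos (by norm_num), Int.mul_emod,
        Int.emod_emod_of_dvd _ dvd_rfl, ← Int.mul_emod, pow_succ]
    rw [hmod]
    rw [if_neg (fun h0 => pow_two_mod_ne_zero (m + 1) h0.symm)]

theorem foo_eq_alt (n : Int) : foo n = foo_alt n := by
  unfold foo foo_alt
  by_cases h1 : n ≤ 1
  · simp [h1]
  · by_cases h2 : n = 2
    · simp [h2]
    · by_cases h3 : n = 3
      · simp [h3]
      · simp only [if_neg h1, if_neg h2, if_neg h3]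
        have hn : 4 ≤ n := by omega
        set m : Nat := (n - 4).toNat with hm
        have hm4 : n - 4 = (m : Int) := by omega
        have hm3 : n - 3 = (m : Int) + 1 := by omega
        -- sigma part
        have hsig : sigmaA (n - 3) = PySem.Int.floordiv ((n - 3) * (n - 4)) 2 := by
          have h2s : 2 * sigmaA (n - 3) = (n - 3) * (n - 4) := by
            rw [hm3, hm4]
            have := sigmaA_eq (m + 1)
            push_cast at this
            linear_combination this
          rw [← h2s, PySem.Int.floordiv_eq_ediv_of_pos (by norm_num),
            Int.mul_ediv_cancel_left _ (by norm_num)]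
        -- power part
        have hpow : (PySem.List.pyRange 0 (n - 3) 1).foldl
            (fun b _ =>
              let b := PySem.Int.mod (b * 2) 15746
              if 0 = b then 1 else b) 0 = (2 : Int) ^ m % 15746 := by
          rw [hm3]; exact loopB_eq m
        rw [hpow, hsig]
        have : PySem.Int.mod ((2 : Int) ^ m % 15746) 15746 = (2 : Int) ^ m % 15746 := by
          rw [PySem.Int.mod_eq_emod_of_pos (by norm_num), Int.emod_emod_of_dvd _ dvd_rfl]
        rw [this]
        have hp : PySem.Int.powMod 2 (n - 4).toNat 15746 = (2 : Int) ^ m % 15746 := by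
          rw [PySem.Int.powMod, ← hm, PySem.Int.mod_eq_emod_of_pos (by norm_num)]
        rw [hp]

-- ===== VERDICT (by name: the statement is the Claim_ definition above) =====
theorem foo_spec : Claim_equal_foo := by
  intro n _
  exact foo_eq_alt n
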